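-- pv_equiv track=rewrite | github.com/ccantynz-alt/DavenRoe | backend/app/integrations/importer.py | _auto_detect_columns
-- ===== SOURCE A (Python) =====
-- def _auto_detect_columns(headers: list[str] | dict) -> dict:
--     """Auto-detect column mapping from header names."""
--     headers = list(headers) if not isinstance(headers, list) else headers
--     mapping = {}
--
--     date_keywords = ["date", "posted", "transaction date"]
--     amount_keywords = ["amount", "total", "value", "sum"]
--     desc_keywords = ["description", "memo", "narrative", "details", "particulars"]
--     ref_keywords = ["reference", "ref", "number", "no", "invoice"]
--     account_keywords = ["account", "category", "nominal", "gl code"]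
--
--     for header in headers:
--         h = header.lower().strip()
--         if any(k in h for k in date_keywords):
--             mapping[header] = "date"
--         elif any(k == h for k in amount_keywords):
--             mapping[header] = "amount"
--         elif h in ("debit", "dr"):
--             mapping[header] = "debit"
--         elif h in ("credit", "cr"):
--             mapping[header] = "credit"
--         elif any(k in h for k in desc_keywords):
--             mapping[header] = "description"
--         elif any(k in h for k in ref_keywords):
--             mapping[header] = "reference"
--         elif any(k in h for k in account_keywords):
--             mapping[header] = "account_name"
--
--     return mapping
-- ===== SOURCE B (Python) =====
-- _RULES = [
--     ("date", ["date", "posted", "transaction date"], True),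
--     ("amount", ["amount", "total", "value", "sum"], False),
--     ("debit", ["debit", "dr"], False),
--     ("credit", ["credit", "cr"], False),
--     ("description", ["description", "memo", "narrative", "details", "particulars"], True),
--     ("reference", ["reference", "ref", "number", "no", "invoice"], True),
--     ("account_name", ["account", "category", "nominal", "gl code"], True),
-- ]
--
--
-- def _matches(keywords, substring, header):
--     h = header.lower().strip()
--     return any((k in h) if substring else (k == h) for k in keywords)
--
--
-- def _auto_detect_columns(headers):
--     """Auto-detect column mapping: sweep the rules from lowest to highest
--     priority over all headers, letting higher-priority labels overwrite
--     lower ones, then emit the labels in header order."""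
--     headers = list(headers)
--     label_of = {}
--     for label, keywords, substring in reversed(_RULES):
--         for header in headers:
--             if _matches(keywords, substring, header):
--                 label_of[header] = label
--     return {h: label_of[h] for h in headers if h in label_of}
-- ===== Notes on version B (the rewrite author's own statement) =====
-- stated objective: alternative
-- what changed: Inverted the loop nesting: instead of a per-header first-match if/elif cascade, B sweeps each rule (lowest to highest priority) over all headers letting higher-priority labels overwrite lower ones in a label dict, then emits labels in header order in a final pass.
import Mathlib
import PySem

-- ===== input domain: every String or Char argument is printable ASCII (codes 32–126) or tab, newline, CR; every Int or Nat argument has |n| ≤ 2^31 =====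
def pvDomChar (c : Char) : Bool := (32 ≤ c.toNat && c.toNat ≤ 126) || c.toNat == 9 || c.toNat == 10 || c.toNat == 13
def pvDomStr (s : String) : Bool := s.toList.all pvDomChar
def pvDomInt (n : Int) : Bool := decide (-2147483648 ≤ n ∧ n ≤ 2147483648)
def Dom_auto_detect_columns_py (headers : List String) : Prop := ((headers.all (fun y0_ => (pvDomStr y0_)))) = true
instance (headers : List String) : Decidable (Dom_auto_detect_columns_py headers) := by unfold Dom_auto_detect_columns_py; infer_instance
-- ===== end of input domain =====

-- B inverts the loop nesting: each rule is swept over all headers from lowest to highest priority with overwrite, then labels are emitted in header order; same asymptotic cost, a different traversal.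



-- ===== PORT A =====
def auto_detect_columns_py (headers : List String) : List (String × String) :=
  let date_keywords := ["date", "posted", "transaction date"]
  let amount_keywords := ["amount", "total", "value", "sum"]
  let desc_keywords := ["description", "memo", "narrative", "details", "particulars"]
  let ref_keywords := ["reference", "ref", "number", "no", "invoice"]
  let account_keywords := ["account", "category", "nominal", "gl code"]
  let mapping := headers.foldl (fun (mapping : PySem.Dict String String) header =>
    let h := PySem.Str.strip (PySem.Str.lower header)
    if date_keywords.any (fun k => PySem.Str.isIn k h) then mapping.insert header "date"
    else if amount_keywords.any (fun k => k == h) then mapping.insert header "amount"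
    else if h == "debit" || h == "dr" then mapping.insert header "debit"
    else if h == "credit" || h == "cr" then mapping.insert header "credit"
    else if desc_keywords.any (fun k => PySem.Str.isIn k h) then mapping.insert header "description"
    else if ref_keywords.any (fun k => PySem.Str.isIn k h) then mapping.insert header "reference"
    else if account_keywords.any (fun k => PySem.Str.isIn k h) then mapping.insert header "account_name"
    else mapping) PySem.Dict.empty
  mapping.items

-- ===== PORT B =====
-- rules table in priority order: (label, keywords, substring flag; true = substring match, false = exact)
def pvRules : List (String × List String × Bool) :=
  [("date", ["date", "posted", "transaction date"], true),
   ("amount", ["amount", "total", "value", "sum"], false),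
   ("debit", ["debit", "dr"], false),
   ("credit", ["credit", "cr"], false),
   ("description", ["description", "memo", "narrative", "details", "particulars"], true),
   ("reference", ["reference", "ref", "number", "no", "invoice"], true),
   ("account_name", ["account", "category", "nominal", "gl code"], true)]

-- _matches(keywords, substring, header)
def pvMatches (keywords : List String) (substring : Bool) (header : String) : Bool :=
  let h := PySem.Str.strip (PySem.Str.lower header)
  keywords.any (fun k => if substring then PySem.Str.isIn k h else k == h)

-- one sweep of a single rule over all headers (the inner loop of B)
def pvSweep (headers : List String) (d : PySem.Dict String String)
    (rule : String × List String × Bool) : PySem.Dict String String :=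
  headers.foldl (fun d header =>
    if pvMatches rule.2.1 rule.2.2 header then d.insert header rule.1 else d) d

def auto_detect_columns_py_alt (headers : List String) : List (String × String) :=
  let label_of := pvRules.reverse.foldl (pvSweep headers) PySem.Dict.empty
  (headers.foldl (fun (m : PySem.Dict String String) header =>
    match label_of.get? header with
    | some label => m.insert header label
    | none => m) PySem.Dict.empty).items

-- ===== PRECONDITION & SPEC =====
def Spec_auto_detect_columns_py (headers : List String) (out : List (String × String)) : Prop := out = auto_detect_columns_py_alt headers
instance (headers : List String) (out : List (String × String)) : Decidable (Spec_auto_detect_columns_py headers out) := by unfold Spec_auto_detect_columns_py; infer_instance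

-- ===== CLAIM =====
def Claim_equal_auto_detect_columns_py : Prop := ∀ (headers : List String), Dom_auto_detect_columns_py headers → Spec_auto_detect_columns_py headers (auto_detect_columns_py headers)

-- ===== LEMMAS AND PROOFS =====
-- (proof-only) first rule in a list matching the header, in priority order
def pvFirst (header : String) : List (String × List String × Bool) → Option String
  | [] => none
  | r :: rest => if pvMatches r.2.1 r.2.2 header then some r.1 else pvFirst header rest

-- lookup after one sweep
theorem pv_sweep_get? (headers : List String) (d : PySem.Dict String String)
    (r : String × List String × Bool) (x : String) :
    (pvSweep headers d r).get? x =
      if x ∈ headers ∧ pvMatches r.2.1 r.2.2 x = true then some r.1 else d.get? x := by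
  induction headers generalizing d with
  | nil => simp [pvSweep]
  | cons header rest ih =>
    simp only [pvSweep, List.foldl_cons] at *
    rw [ih]
    by_cases hx : x ∈ rest ∧ pvMatches r.2.1 r.2.2 x = true
    · rw [if_pos hx, if_pos ⟨List.mem_cons_of_mem _ hx.1, hx.2⟩]
    · by_cases hm : pvMatches r.2.1 r.2.2 header = true
      · rw [if_pos hm]
        by_cases he : x = header
        · subst he
          rw [if_neg hx, if_pos ⟨List.mem_cons_self, hm⟩, PySem.Dict.get?_insert_self]
        · have hc : ¬ (x ∈ header :: rest ∧ pvMatches r.2.1 r.2.2 x = true) := by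
            intro ⟨h1, h2⟩
            rcases List.mem_cons.mp h1 with h | h
            · exact he h
            · exact hx ⟨h, h2⟩
          rw [if_neg hx, if_neg hc, PySem.Dict.get?_insert_of_ne _ _ he]
      · have hc : ¬ (x ∈ header :: rest ∧ pvMatches r.2.1 r.2.2 x = true) := by
          intro ⟨h1, h2⟩
          rcases List.mem_cons.mp h1 with h | h
          · rw [h] at h2; exact hm h2
          · exact hx ⟨h, h2⟩
        rw [if_neg (fun h => hm h), if_neg hx, if_neg hc]

-- lookup after all sweeps (reverse priority order) = first matching rule in priority order
theorem pv_sweeps_get? (headers : List String) (rs : List (String × List String × Bool)) (x : String) :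
    (rs.reverse.foldl (pvSweep headers) PySem.Dict.empty).get? x =
      if x ∈ headers then pvFirst x rs else none := by
  induction rs with
  | nil => simp [PySem.Dict.get?_empty, pvFirst]
  | cons r rest ih =>
    rw [List.reverse_cons, List.foldl_append]
    simp only [List.foldl_cons, List.foldl_nil]
    rw [pv_sweep_get?, ih]
    by_cases hx : x ∈ headers
    · by_cases hm : pvMatches r.2.1 r.2.2 x = true
      · simp [hx, hm, pvFirst]
      · simp [hx, hm, pvFirst]
    · simp [hx]

-- an if/elif cascade over booleans equals a match on the first-hit option
theorem pv_cascade_eq (m : PySem.Dict String String) (header : String)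
    (c1 c2 c3 c4 c5 c6 c7 : Bool) :
    (if c1 then m.insert header "date"
     else if c2 then m.insert header "amount"
     else if c3 then m.insert header "debit"
     else if c4 then m.insert header "credit"
     else if c5 then m.insert header "description"
     else if c6 then m.insert header "reference"
     else if c7 then m.insert header "account_name"
     else m) =
    (match (if c1 then some "date"
            else if c2 then some "amount"
            else if c3 then some "debit"
            else if c4 then some "credit"
            else if c5 then some "description"
            else if c6 then some "reference"
            else if c7 then some "account_name"
            else none : Option String) with
     | some label => m.insert header label
     | none => m) := by
  cases c1 <;> cases c2 <;> cases c3 <;> cases c4 <;> cases c5 <;> cases c6 <;> cases c7 <;> rfl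

-- pvFirst on the literal rules table, written out as A's seven conditions
theorem pv_first_eq (header : String) :
    pvFirst header pvRules =
    (if ((["date", "posted", "transaction date"] : List String).any (fun k => PySem.Str.isIn k (PySem.Str.strip (PySem.Str.lower header)))) then some "date"
     else if ((["amount", "total", "value", "sum"] : List String).any (fun k => k == (PySem.Str.strip (PySem.Str.lower header)))) then some "amount"
     else if ((PySem.Str.strip (PySem.Str.lower header)) == "debit" || (PySem.Str.strip (PySem.Str.lower header)) == "dr") then some "debit"
     else if ((PySem.Str.strip (PySem.Str.lower header)) == "credit" || (PySem.Str.strip (PySem.Str.lower header)) == "cr") then some "credit"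
     else if ((["description", "memo", "narrative", "details", "particulars"] : List String).any (fun k => PySem.Str.isIn k (PySem.Str.strip (PySem.Str.lower header)))) then some "description"
     else if ((["reference", "ref", "number", "no", "invoice"] : List String).any (fun k => PySem.Str.isIn k (PySem.Str.strip (PySem.Str.lower header)))) then some "reference"
     else if ((["account", "category", "nominal", "gl code"] : List String).any (fun k => PySem.Str.isIn k (PySem.Str.strip (PySem.Str.lower header)))) then some "account_name"
     else none) := by
  have e1 : ∀ a : String, (a == PySem.Str.strip (PySem.Str.lower header)) = (PySem.Str.strip (PySem.Str.lower header) == a) := fun a => by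
    by_cases hx : a = PySem.Str.strip (PySem.Str.lower header) <;> simp [hx, BEq.comm]
  simp only [pvRules, pvFirst, pvMatches, List.any_cons, List.any_nil, if_true,
    Bool.false_eq_true, if_false, Bool.or_false]
  rw [e1 "debit", e1 "dr", e1 "credit", e1 "cr"]

-- one header: A's if/elif step equals B's table lookup written as the first matching rule
theorem pv_step_eq (m : PySem.Dict String String) (header : String) :
    (if (["date", "posted", "transaction date"] : List String).any (fun k => PySem.Str.isIn k (PySem.Str.strip (PySem.Str.lower header))) then m.insert header "date"
     else if (["amount", "total", "value", "sum"] : List String).any (fun k => k == (PySem.Str.strip (PySem.Str.lower header))) then m.insert header "amount"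
     else if (PySem.Str.strip (PySem.Str.lower header)) == "debit" || (PySem.Str.strip (PySem.Str.lower header)) == "dr" then m.insert header "debit"
     else if (PySem.Str.strip (PySem.Str.lower header)) == "credit" || (PySem.Str.strip (PySem.Str.lower header)) == "cr" then m.insert header "credit"
     else if (["description", "memo", "narrative", "details", "particulars"] : List String).any (fun k => PySem.Str.isIn k (PySem.Str.strip (PySem.Str.lower header))) then m.insert header "description"
     else if (["reference", "ref", "number", "no", "invoice"] : List String).any (fun k => PySem.Str.isIn k (PySem.Str.strip (PySem.Str.lower header))) then m.insert header "reference"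
     else if (["account", "category", "nominal", "gl code"] : List String).any (fun k => PySem.Str.isIn k (PySem.Str.strip (PySem.Str.lower header))) then m.insert header "account_name"
     else m) =
    (match pvFirst header pvRules with
     | some label => m.insert header label
     | none => m) := by
  rw [pv_first_eq]
  generalize (["date", "posted", "transaction date"] : List String).any (fun k => PySem.Str.isIn k (PySem.Str.strip (PySem.Str.lower header))) = c1
  generalize (["amount", "total", "value", "sum"] : List String).any (fun k => k == (PySem.Str.strip (PySem.Str.lower header))) = c2
  generalize ((PySem.Str.strip (PySem.Str.lower header)) == "debit" || (PySem.Str.strip (PySem.Str.lower header)) == "dr") = c3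
  generalize ((PySem.Str.strip (PySem.Str.lower header)) == "credit" || (PySem.Str.strip (PySem.Str.lower header)) == "cr") = c4
  generalize (["description", "memo", "narrative", "details", "particulars"] : List String).any (fun k => PySem.Str.isIn k (PySem.Str.strip (PySem.Str.lower header))) = c5
  generalize (["reference", "ref", "number", "no", "invoice"] : List String).any (fun k => PySem.Str.isIn k (PySem.Str.strip (PySem.Str.lower header))) = c6
  generalize (["account", "category", "nominal", "gl code"] : List String).any (fun k => PySem.Str.isIn k (PySem.Str.strip (PySem.Str.lower header))) = c7
  exact pv_cascade_eq m header c1 c2 c3 c4 c5 c6 c7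

theorem auto_detect_columns_py_eq (headers : List String) :
    auto_detect_columns_py headers = auto_detect_columns_py_alt headers := by
  unfold auto_detect_columns_py auto_detect_columns_py_alt
  refine congrArg PySem.Dict.items (PySem.List.foldl_congr_mem _ _ _ _ ?_)
  intro m header hmem
  rw [pv_sweeps_get? headers pvRules header, if_pos hmem]
  exact pv_step_eq m header

-- ===== VERDICT =====
theorem auto_detect_columns_py_spec : Claim_equal_auto_detect_columns_py := by
  intro headers _
  unfold Spec_auto_detect_columns_py
  exact auto_detect_columns_py_eq headers
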